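-- pv_equiv track=rewrite | github.com/wikimedia/revscoring | revscoring/utilities/fetch_idioms.py | create_regexes
-- ===== SOURCE A (Python) =====
-- def combine_words(first_word, following_words):
--     """
--         Combines the first word and following words into one regex
--         Sample:
--         first_word (word1|word2|...|wordx)
--     """
--     if len(following_words) == 1:
--         idiom_regex = '{} {}'.format(
--             first_word, "".join(following_words))
--     else:
--         idiom_regex = '{} ({})'.format(
--             first_word, "|".join(following_words))
--     if not idiom_regex.isspace():
--         return idiom_regex
--
-- def create_regexes(idioms):
--     """
--         Creates regexes out of idioms
--     """
--     regexes = []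
--     first_word = ''
--     following_words = []
--     for idiom in idioms:
--         words = idiom.split()
--         if first_word == '':
--             pass
--         elif first_word == words[0]:
--             following_words.append(" ".join(words[1:]))
--             continue
--         else:
--             regex = combine_words(first_word, following_words)
--             if regex:
--                 regexes.append(regex)
--         first_word = words[0]
--         following_words = [" ".join(words[1:])]
--
--     regex = combine_words(first_word, following_words)
--     if regex:
--         regexes.append(regex)
--
--     return regexes
-- ===== SOURCE B (Python) =====
-- def combine_words(first_word, following_words):
--     """
--         Combines the first word and following words into one regex
--         Sample:
--         first_word (word1|word2|...|wordx)
--     """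
--     if len(following_words) == 1:
--         idiom_regex = '{} {}'.format(
--             first_word, "".join(following_words))
--     else:
--         idiom_regex = '{} ({})'.format(
--             first_word, "|".join(following_words))
--     if not idiom_regex.isspace():
--         return idiom_regex
--
--
-- def create_regexes(idioms):
--     """
--         Creates regexes out of idioms, by staged passes: split every idiom
--         once into its first word and the rest, compute the boundary indices
--         where the first word changes, then format each index segment.
--     """
--     firsts = [idiom.split()[0] for idiom in idioms]
--     rests = [" ".join(idiom.split()[1:]) for idiom in idioms]
--     starts = [i for i in range(len(idioms))
--               if i == 0 or firsts[i] != firsts[i - 1]]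
--     ends = starts[1:] + [len(idioms)]
--     regexes = []
--     for start, end in zip(starts, ends):
--         regex = combine_words(firsts[start], rests[start:end])
--         if regex:
--             regexes.append(regex)
--     return regexes
-- ===== Notes on version B (the rewrite author's own statement) =====
-- stated objective: alternative
-- what changed: Replaces A's single-pass accumulator loop (first_word sentinel, continue, post-loop flush) by staged passes: split every idiom once into first word and rest, compute the boundary indices where the first word changes, then slice and format each index segment.
-- intended difference: On the empty idiom list A returns a one-element list holding a bogus space-and-parentheses regex (an artefact of the trailing flush running on the initial empty sentinel with no words), while B returns the intended empty list. — e.g. on create_regexes([]): A returns [" ()"], B returns []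
import Mathlib
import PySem

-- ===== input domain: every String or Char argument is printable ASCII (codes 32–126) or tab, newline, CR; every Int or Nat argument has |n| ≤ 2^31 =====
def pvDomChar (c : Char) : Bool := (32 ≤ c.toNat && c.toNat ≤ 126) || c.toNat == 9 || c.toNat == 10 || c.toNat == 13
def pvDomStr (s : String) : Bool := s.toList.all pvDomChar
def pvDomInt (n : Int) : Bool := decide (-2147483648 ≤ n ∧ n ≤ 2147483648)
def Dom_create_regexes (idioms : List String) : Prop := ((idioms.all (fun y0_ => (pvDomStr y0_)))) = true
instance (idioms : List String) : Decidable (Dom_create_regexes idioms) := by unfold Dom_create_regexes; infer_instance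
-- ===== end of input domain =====

-- B replaces A's single-pass sentinel/flush loop by staged passes (split all idioms, find the
-- boundary indices where the first word changes, format each index segment): same return value,
-- a different decomposition; on the empty list the two differ (stated as D_ below).

-- ===== PORT A =====
-- shared helper: combine_words (identical in Source A and Source B); returns none where Python returns None
def combine_words (first_word : String) (following_words : List String) : Option String :=
  let idiom_regex :=
    if following_words.length = 1 then
      PySem.Str.join "" [first_word, " ", PySem.Str.join "" following_words]
    else
      PySem.Str.join "" [first_word, " (", PySem.Str.join "|" following_words, ")"]
  if PySem.Str.strIsspace idiom_regex then none else some idiom_regex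

-- shared helper: `regex = combine_words(…); if regex: regexes.append(regex)` (truthiness: not None, not "")
def pushRegex (regexes : List String) (r? : Option String) : List String :=
  match r? with
  | some r => if r = "" then regexes else regexes ++ [r]
  | none => regexes

-- `" ".join(words[1:])`
def followOf (words : List String) : String :=
  PySem.Str.join " " (PySem.List.slice words (some 1) none)

-- the body of A's for-loop; state = (regexes, first_word, following_words).
-- `words[0]` raises IndexError when the idiom is whitespace-only; Pre_ excludes that, headD "" is the stand-in.
def aStep (st : List String × String × List String) (idiom : String) : List String × String × List String :=
  let words := PySem.Str.split₀ idiom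
  if st.2.1 = "" then
    (st.1, words.headD "", [followOf words])
  else if st.2.1 = words.headD "" then
    (st.1, st.2.1, st.2.2 ++ [followOf words])
  else
    (pushRegex st.1 (combine_words st.2.1 st.2.2), words.headD "", [followOf words])

def create_regexes (idioms : List String) : List String :=
  let st := idioms.foldl aStep ([], "", [])
  pushRegex st.1 (combine_words st.2.1 st.2.2)

-- ===== PORT B =====
-- `idiom.split()[0]` (headD "" stands in for the IndexError case, excluded by Pre_)
def firstWord (s : String) : String := (PySem.Str.split₀ s).headD ""

-- `" ".join(idiom.split()[1:])` (the rests-comprehension's body)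
def follow (idiom : String) : String := followOf (PySem.Str.split₀ idiom)

-- body of B's for-loop over zip(starts, ends); `rests[start:end]` with 0 ≤ start ≤ end is exactly
-- drop/take (PySem.List.slice_natCast), and `firsts[start]` is in range, so getD is exact.
-- the starts-comprehension's condition: `i == 0 or firsts[i] != firsts[i-1]`
def bPred (firsts : List String) (i : Nat) : Bool :=
  i == 0 || firsts.getD i "" != firsts.getD (i - 1) ""

def bStepIdx (firsts rests : List String) (regexes : List String) (p : Nat × Nat) : List String :=
  pushRegex regexes (combine_words (firsts.getD p.1 "") ((rests.drop p.1).take (p.2 - p.1)))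

def create_regexes_alt (idioms : List String) : List String :=
  let firsts := idioms.map firstWord
  let rests := idioms.map follow
  let starts := (List.range idioms.length).filter (bPred firsts)
  let ends := starts.drop 1 ++ [idioms.length]
  (starts.zip ends).foldl (bStepIdx firsts rests) []

-- ===== PRECONDITION & SPEC =====
-- Pre_ excludes exactly the idiom lists containing a whitespace-only (or empty) string:
-- there `idiom.split()[0]` raises IndexError in both A and B.
def Pre_create_regexes (idioms : List String) : Prop :=
  ∀ s ∈ idioms, PySem.Str.split₀ s ≠ []
instance (idioms : List String) : Decidable (Pre_create_regexes idioms) := by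
  unfold Pre_create_regexes; infer_instance

def pvWitness_create_regexes : List String := ["big deal", "big shot", "cold feet"]

-- On the empty list A returns a one-element list holding a bogus space-and-parentheses regex — an
-- artefact of the trailing flush with the initial empty sentinel — while B returns the intended empty list.
def D_create_regexes (idioms : List String) : Prop := idioms = []
instance (idioms : List String) : Decidable (D_create_regexes idioms) := by
  unfold D_create_regexes; infer_instance

def Spec_create_regexes (idioms : List String) (out : List String) : Prop :=
  ¬ D_create_regexes idioms → out = create_regexes_alt idioms
instance (idioms : List String) (out : List String) : Decidable (Spec_create_regexes idioms out) := by
  unfold Spec_create_regexes; infer_instance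

def pvDiffWitness_create_regexes : List String := []
def pvDiffWitnessOut_create_regexes : (List String) × (List String) := ([" ()"], [])

-- ===== CLAIM (what is proved, stated in full; the proofs are below) =====
def Claim_unchanged_create_regexes : Prop := ∀ (idioms : List String), Dom_create_regexes idioms → Pre_create_regexes idioms → Spec_create_regexes idioms (create_regexes idioms)
def Claim_changed_create_regexes : Prop := Dom_create_regexes (pvDiffWitness_create_regexes) ∧ Pre_create_regexes (pvDiffWitness_create_regexes) ∧ D_create_regexes (pvDiffWitness_create_regexes) ∧ create_regexes (pvDiffWitness_create_regexes) = pvDiffWitnessOut_create_regexes.1 ∧ create_regexes_alt (pvDiffWitness_create_regexes) = pvDiffWitnessOut_create_regexes.2 ∧ pvDiffWitnessOut_create_regexes.1 ≠ pvDiffWitnessOut_create_regexes.2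
def Claim_exact_create_regexes : Prop := ∀ (idioms : List String), Dom_create_regexes idioms → Pre_create_regexes idioms → D_create_regexes idioms → create_regexes idioms ≠ create_regexes_alt idioms

-- ===== LEMMAS AND PROOFS =====

-- The proofs go through a common bridge: the list of consecutive runs sharing a first word
-- (A reaches it by its sentinel loop, B by its boundary indices).

def spanFW (k : String) : List String → List String × List String
  | [] => ([], [])
  | x :: xs =>
    if firstWord x = k then
      let p := spanFW k xs
      (x :: p.1, p.2)
    else ([], x :: xs)

theorem spanFW_snd_length (k : String) : ∀ xs : List String, (spanFW k xs).2.length ≤ xs.length := by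
  intro xs
  induction xs with
  | nil => simp [spanFW]
  | cons x xs ih =>
    simp only [spanFW]
    split
    · exact Nat.le_succ_of_le ih
    · exact Nat.le_refl _

def groupsFW : List String → List (String × List String)
  | [] => []
  | x :: xs =>
    let p := spanFW (firstWord x) xs
    (firstWord x, x :: p.1) :: groupsFW p.2
  termination_by l => l.length
  decreasing_by
    exact Nat.lt_succ_of_le (spanFW_snd_length _ xs)

def bStep (regexes : List String) (g : String × List String) : List String :=
  pushRegex regexes (combine_words g.1 (g.2.map follow))

def bridge (idioms : List String) : List String :=
  (groupsFW idioms).foldl bStep []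

theorem groupsFW_nil : groupsFW [] = [] := by rw [groupsFW]

theorem groupsFW_cons (x : String) (xs : List String) :
    groupsFW (x :: xs) =
      (firstWord x, x :: (spanFW (firstWord x) xs).1) :: groupsFW (spanFW (firstWord x) xs).2 := by
  rw [groupsFW]

-- every word produced by Python's str.split() is nonempty
theorem split₀_go_ne_nil : ∀ (s cur : List Char) (acc : List (List Char)),
    (∀ w ∈ acc, w ≠ ([] : List Char)) →
    ∀ w ∈ PySem.Chars.split₀.go s cur acc, w ≠ ([] : List Char) := by
  intro s
  induction s with
  | nil =>
    intro cur acc hacc w hw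
    simp only [PySem.Chars.split₀.go] at hw
    split at hw
    · exact hacc w (List.mem_reverse.mp hw)
    · rename_i hne
      rcases List.mem_cons.mp (List.mem_reverse.mp hw) with h | h
      · subst h
        simp only [List.isEmpty_iff] at hne
        simpa using hne
      · exact hacc w h
  | cons c rest ih =>
    intro cur acc hacc w hw
    simp only [PySem.Chars.split₀.go] at hw
    split at hw
    · split at hw
      · exact ih [] acc hacc w hw
      · rename_i hne
        refine ih [] (cur.reverse :: acc) ?_ w hw
        intro u hu
        rcases List.mem_cons.mp hu with h | h
        · subst h
          simp only [List.isEmpty_iff] at hne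
          simpa using hne
        · exact hacc u h
    · exact ih (c :: cur) acc hacc w hw

theorem mem_split₀_ne_nil {s w : List Char} (h : w ∈ PySem.Chars.split₀ s) : w ≠ [] :=
  split₀_go_ne_nil s [] [] (by simp) w h

theorem firstWord_ne_empty {s : String} (h : PySem.Str.split₀ s ≠ []) : firstWord s ≠ "" := by
  have hsplit : PySem.Str.split₀ s = (PySem.Chars.split₀ s.toList).map String.ofList := rfl
  unfold firstWord
  rcases hc : PySem.Chars.split₀ s.toList with _ | ⟨u, us⟩
  · exact absurd (by rw [hsplit, hc]; rfl) h
  · rw [hsplit, hc]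
    simp only [List.map_cons, List.headD_cons]
    intro hcon
    have hu : u ≠ [] := mem_split₀_ne_nil (s := s.toList) (by rw [hc]; exact List.mem_cons_self ..)
    have h2 := congrArg String.toList hcon
    rw [String.toList_ofList] at h2
    exact hu (by simpa using h2)

theorem pushRegex_append (regexes : List String) (r? : Option String) :
    pushRegex regexes r? = regexes ++ pushRegex [] r? := by
  cases r? with
  | none => simp [pushRegex]
  | some r => by_cases h : r = "" <;> simp [pushRegex, h]

theorem foldl_bStep_append (gs : List (String × List String)) (acc : List String) :
    gs.foldl bStep acc = acc ++ gs.foldl bStep [] := by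
  induction gs generalizing acc with
  | nil => simp
  | cons g gs ih =>
    simp only [List.foldl_cons]
    rw [ih (bStep acc g), ih (bStep [] g)]
    unfold bStep
    rw [pushRegex_append acc, List.append_assoc]

-- ===== A = bridge =====

theorem a_mid : ∀ (rest : List String) (fw : String) (fws regexes : List String),
    fw ≠ "" → (∀ s ∈ rest, firstWord s ≠ "") →
    (let st := rest.foldl aStep (regexes, fw, fws)
     pushRegex st.1 (combine_words st.2.1 st.2.2)) =
      regexes ++ pushRegex [] (combine_words fw (fws ++ (spanFW fw rest).1.map follow)) ++
        (groupsFW (spanFW fw rest).2).foldl bStep [] := by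
  intro rest
  induction rest with
  | nil =>
    intro fw fws regexes hfw _
    simp [spanFW, groupsFW_nil, pushRegex_append regexes]
  | cons x xs ih =>
    intro fw fws regexes hfw hrest
    have hx : firstWord x ≠ "" := hrest x (by simp)
    have hxs : ∀ s ∈ xs, firstWord s ≠ "" := fun s hs => hrest s (by simp [hs])
    have hfw0 : (PySem.Str.split₀ x).head?.getD "" = firstWord x := by simp [firstWord]
    simp only [List.foldl_cons]
    by_cases hk : firstWord x = fw
    · have hstep : aStep (regexes, fw, fws) x = (regexes, fw, fws ++ [follow x]) := by
        simp [aStep, hfw, hfw0, hk, follow, followOf]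
      rw [hstep, ih fw (fws ++ [follow x]) regexes hfw hxs]
      have hspan : spanFW fw (x :: xs) = (x :: (spanFW fw xs).1, (spanFW fw xs).2) := by
        simp [spanFW, hk]
      rw [hspan]
      simp [List.append_assoc]
    · have hk2 : ¬ fw = firstWord x := fun hcon => hk hcon.symm
      have hstep : aStep (regexes, fw, fws) x =
          (pushRegex regexes (combine_words fw fws), firstWord x, [follow x]) := by
        simp [aStep, hfw, hfw0, hk2, follow, followOf]
      rw [hstep, ih (firstWord x) [follow x] _ hx hxs]
      have hspan : spanFW fw (x :: xs) = ([], x :: xs) := by simp [spanFW, hk]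
      rw [hspan, groupsFW_cons]
      simp only [List.map_nil, List.append_nil, List.foldl_cons]
      rw [foldl_bStep_append _ (bStep [] _), pushRegex_append regexes]
      simp [bStep, List.append_assoc]

theorem A_eq_bridge (x : String) (xs : List String)
    (hpre : ∀ s ∈ (x :: xs), PySem.Str.split₀ s ≠ []) :
    create_regexes (x :: xs) = bridge (x :: xs) := by
  have hx : firstWord x ≠ "" := firstWord_ne_empty (hpre x (by simp))
  have hxs : ∀ s ∈ xs, firstWord s ≠ "" := fun s hs =>
    firstWord_ne_empty (hpre s (by simp [hs]))
  unfold create_regexes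
  simp only [List.foldl_cons]
  have hstep : aStep ([], "", []) x = ([], firstWord x, [follow x]) := by
    simp [aStep, firstWord, follow, followOf]
  rw [hstep, a_mid xs (firstWord x) [follow x] [] hx hxs]
  unfold bridge
  rw [groupsFW_cons]
  simp only [List.foldl_cons]
  rw [foldl_bStep_append _ (bStep [] _)]
  simp [bStep]

-- ===== B = bridge =====

theorem spanFW_fst_fw (k : String) : ∀ xs : List String, ∀ y ∈ (spanFW k xs).1, firstWord y = k := by
  intro xs
  induction xs with
  | nil => simp [spanFW]
  | cons x xs ih =>
    intro y hy
    simp only [spanFW] at hy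
    split at hy
    · rcases List.mem_cons.mp hy with h | h
      · subst h; assumption
      · exact ih y h
    · simp at hy

theorem spanFW_snd_head (k : String) : ∀ (xs : List String) (y : String) (ys : List String),
    (spanFW k xs).2 = y :: ys → firstWord y ≠ k := by
  intro xs
  induction xs with
  | nil => intro y ys h; simp [spanFW] at h
  | cons x xs ih =>
    intro y ys h
    simp only [spanFW] at h
    split at h
    · exact ih y ys h
    · rename_i hne
      obtain ⟨h1, -⟩ := List.cons.inj h
      subst h1; exact hne

theorem spanFW_append (k : String) : ∀ xs : List String, (spanFW k xs).1 ++ (spanFW k xs).2 = xs := by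
  intro xs
  induction xs with
  | nil => simp [spanFW]
  | cons x xs ih =>
    simp only [spanFW]
    split
    · simpa using ih
    · simp

theorem foldl_bStepIdx_append (F R : List String) (pairs : List (Nat × Nat)) (acc : List String) :
    pairs.foldl (bStepIdx F R) acc = acc ++ pairs.foldl (bStepIdx F R) [] := by
  induction pairs generalizing acc with
  | nil => simp
  | cons p ps ih =>
    simp only [List.foldl_cons]
    rw [ih (bStepIdx F R acc p), ih (bStepIdx F R [] p)]
    unfold bStepIdx
    rw [pushRegex_append acc, List.append_assoc]

-- B's boundary indices of `replicate s fw ++ F₂` are 0 followed by F₂'s boundaries shifted by s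
theorem starts_decomp (fw : String) (F₂ : List String) (s : Nat) (hs : 1 ≤ s)
    (h0 : 0 < F₂.length → F₂.getD 0 "" ≠ fw) :
    (List.range (s + F₂.length)).filter (bPred (List.replicate s fw ++ F₂)) =
      0 :: ((List.range F₂.length).filter (bPred F₂)).map (s + ·) := by
  set F := List.replicate s fw ++ F₂ with hF
  have hgetlo : ∀ i, i < s → F.getD i "" = fw := by
    intro i hi
    rw [hF, List.getD_append _ _ _ _ (by simpa using hi), List.getD_replicate fw hi]
  have hgethi : ∀ j, F.getD (s + j) "" = F₂.getD j "" := by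
    intro j
    rw [hF, List.getD_append_right _ _ _ _ (by simp)]
    congr 1
    simp
  rw [List.range_add, List.filter_append, List.filter_map]
  have hpart1 : (List.range s).filter (bPred F) = [0] := by
    obtain ⟨m, rfl⟩ : ∃ m, s = m + 1 := ⟨s - 1, by omega⟩
    rw [List.range_eq_range', List.range'_succ, List.filter_cons]
    have : bPred F 0 = true := by simp [bPred]
    rw [if_pos this, List.filter_eq_nil_iff.mpr]
    intro i hi
    obtain ⟨k, hk, rfl⟩ := List.mem_range'.mp hi
    have h1 : F.getD (0 + 1 + k) "" = fw := hgetlo _ (by omega)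
    have h2 : F.getD (0 + 1 + k - 1) "" = fw := hgetlo _ (by omega)
    have hb : bPred F (0 + 1 + k) = false := by
      simp only [bPred, h1, h2]
      simp
    simp [hb]
  have hpart2 : (List.range F₂.length).filter (bPred F ∘ (s + ·)) =
      (List.range F₂.length).filter (bPred F₂) := by
    apply List.filter_congr
    intro j hj
    have hj' : j < F₂.length := List.mem_range.mp hj
    cases j with
    | zero =>
      have hA : F.getD s "" = F₂.getD 0 "" := by simpa using hgethi 0
      have hB : F.getD (s - 1) "" = fw := hgetlo (s - 1) (by omega)
      have hne : F₂.getD 0 "" ≠ fw := h0 (by omega)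
      have hsne : (s == 0) = false := by simp; omega
      have hb : bPred F s = true := by
        unfold bPred
        rw [hA, hB, hsne]
        have hne' : ¬ F₂[0]?.getD "" = fw := by simpa [List.getD] using hne
        simp [bne_iff_ne, hne']
      have hb2 : bPred F₂ 0 = true := by simp [bPred]
      simp only [Function.comp_apply, Nat.add_zero, hb, hb2]
    | succ j =>
      have hA : F.getD (s + (j + 1)) "" = F₂.getD (j + 1) "" := hgethi (j + 1)
      have hB : F.getD (s + (j + 1) - 1) "" = F₂.getD j "" := by
        rw [show s + (j + 1) - 1 = s + j by omega]; exact hgethi j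
      have hb : bPred F (s + (j + 1)) = bPred F₂ (j + 1) := by
        simp only [bPred, hA, hB]
        simp
      simpa [Function.comp] using hb
  rw [hpart1]
  have : (List.range F₂.length).filter (bPred F ∘ fun x => s + x) =
      (List.range F₂.length).filter (bPred F₂) := hpart2
  rw [this]
  rfl

theorem zip_shape (S₂ : List Nat) (s n₂ : Nat)
    (hnil : S₂ = [] → n₂ = 0) (hhead : ∀ y T, S₂ = y :: T → y = 0) :
    (0 :: S₂.map (s + ·)).zip (S₂.map (s + ·) ++ [s + n₂]) =
      (0, s) :: (S₂.zip (S₂.drop 1 ++ [n₂])).map (Prod.map (s + ·) (s + ·)) := by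
  cases S₂ with
  | nil => simp [List.zip, hnil rfl]
  | cons y T =>
    have hy : y = 0 := hhead y T rfl
    subst hy
    rw [← List.zip_map]
    simp [List.zip_cons_cons]

theorem B_eq_bridge : ∀ (idioms : List String), create_regexes_alt idioms = bridge idioms := by
  have aux : ∀ (n : Nat) (l : List String), l.length ≤ n → create_regexes_alt l = bridge l := by
    intro n
    induction n with
    | zero =>
      intro l hl
      rw [List.length_eq_zero_iff.mp (Nat.le_zero.mp hl)]
      simp [create_regexes_alt, bridge, groupsFW_nil, List.zip]
    | succ n ih =>
      intro l hl
      cases l with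
      | nil => simp [create_regexes_alt, bridge, groupsFW_nil, List.zip]
      | cons x xs =>
        set fw := firstWord x with hfw
        set g : List String := x :: (spanFW fw xs).1 with hg
        set r : List String := (spanFW fw xs).2 with hr
        set s : Nat := g.length with hs
        have hsplit : x :: xs = g ++ r := by
          rw [hg, hr, List.cons_append, spanFW_append]
        have hs1 : 1 ≤ s := by rw [hs, hg]; simp
        -- firsts and rests decompose along the first run
        have hgfw : ∀ y ∈ g, firstWord y = fw := by
          intro y hy
          rcases List.mem_cons.mp hy with h | h
          · subst h; rfl
          · exact spanFW_fst_fw fw xs y h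
        have hFdec : (x :: xs).map firstWord = List.replicate s fw ++ r.map firstWord := by
          rw [hsplit, List.map_append]
          congr 1
          rw [List.eq_replicate_iff]
          refine ⟨by simp [hs], ?_⟩
          intro b hb
          obtain ⟨y, hy, rfl⟩ := List.mem_map.mp hb
          exact hgfw y hy
        have hRdec : (x :: xs).map follow = g.map follow ++ r.map follow := by
          rw [hsplit, List.map_append]
        have hlen : (x :: xs).length = s + (r.map firstWord).length := by
          rw [hsplit]; simp [hs]
        have h0 : 0 < (r.map firstWord).length → (r.map firstWord).getD 0 "" ≠ fw := by
          intro hpos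
          rcases hry : r with _ | ⟨y, ys⟩
          · rw [hry] at hpos; simp at hpos
          · simpa using spanFW_snd_head fw xs y ys (hr ▸ hry)
        -- the starts, ends and zipped pairs of x :: xs
        have hstarts : (List.range (x :: xs).length).filter (bPred ((x :: xs).map firstWord)) =
            0 :: ((List.range (r.map firstWord).length).filter (bPred (r.map firstWord))).map (s + ·) := by
          rw [hlen, hFdec]
          exact starts_decomp fw (r.map firstWord) s hs1 h0
        set S₂ : List Nat := (List.range (r.map firstWord).length).filter (bPred (r.map firstWord)) with hS₂
        have hnil : S₂ = [] → (r.map firstWord).length = 0 := by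
          intro hS
          by_contra hne
          have hmem : 0 ∈ S₂ := by
            rw [hS₂]
            refine List.mem_filter.mpr ⟨List.mem_range.mpr (by omega), by simp [bPred]⟩
          rw [hS] at hmem
          simp at hmem
        have hhead : ∀ y T, S₂ = y :: T → y = 0 := by
          intro y T hS
          rw [hS₂] at hS
          have hpos : 0 < (r.map firstWord).length := by
            by_contra hcon
            have hz : (r.map firstWord).length = 0 := by omega
            rw [hz] at hS
            simp at hS
          -- 0 passes the filter and is the first element of the range, so the head is 0
          have h0mem : bPred (r.map firstWord) 0 = true := by simp [bPred]
          obtain ⟨m, hm⟩ : ∃ m, (r.map firstWord).length = m + 1 :=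
            ⟨(r.map firstWord).length - 1, by omega⟩
          rw [hm, List.range_eq_range', List.range'_succ, List.filter_cons, if_pos h0mem] at hS
          exact (List.cons.inj hS).1.symm
        -- unfold B's port and rewrite piece by piece
        show (((List.range (x :: xs).length).filter (bPred ((x :: xs).map firstWord))).zip
              (((List.range (x :: xs).length).filter (bPred ((x :: xs).map firstWord))).drop 1
                ++ [(x :: xs).length])).foldl
              (bStepIdx ((x :: xs).map firstWord) ((x :: xs).map follow)) [] = bridge (x :: xs)
        rw [hstarts]
        simp only [List.drop_succ_cons, List.drop_zero]
        rw [hlen, zip_shape S₂ s (r.map firstWord).length hnil hhead]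
        rw [List.foldl_cons]
        -- the first pair produces the first group's regex
        have hfirst : bStepIdx ((x :: xs).map firstWord) ((x :: xs).map follow) [] (0, s) =
            bStep [] (fw, g) := by
          unfold bStepIdx bStep
          congr 1
          have hget0 : ((x :: xs).map firstWord).getD 0 "" = fw := by
            rw [hFdec, List.getD_append _ _ _ _ (by simpa using hs1), List.getD_replicate fw hs1]
          have htake : (((x :: xs).map follow).drop 0).take (s - 0) = g.map follow := by
            rw [List.drop_zero, Nat.sub_zero, hRdec,
              show s = (g.map follow).length by simp [hs], List.take_left]
          rw [hget0, htake]
        rw [hfirst]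
        -- the shifted pairs compute exactly B's fold over r
        have hshift : (fun (acc : List String) (p : Nat × Nat) =>
            bStepIdx ((x :: xs).map firstWord) ((x :: xs).map follow) acc
              (Prod.map (s + ·) (s + ·) p)) = bStepIdx (r.map firstWord) (r.map follow) := by
          funext acc p
          obtain ⟨a, b⟩ := p
          unfold bStepIdx
          simp only [Prod.map]
          have h1 : ((x :: xs).map firstWord).getD (s + a) "" = (r.map firstWord).getD a "" := by
            rw [hFdec, List.getD_append_right _ _ _ _ (by simp)]
            congr 1
            simp
          have h2 : ((x :: xs).map follow).drop (s + a) = (r.map follow).drop a := by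
            rw [hRdec, show s + a = (g.map follow).length + a by simp [hs],
              List.drop_length_add_append]
          have h3 : s + b - (s + a) = b - a := by omega
          rw [h1, h2, h3]
        rw [List.foldl_map, hshift, foldl_bStepIdx_append]
        have hIH : (S₂.zip (S₂.drop 1 ++ [(r.map firstWord).length])).foldl
            (bStepIdx (r.map firstWord) (r.map follow)) [] = bridge r := by
          have halt : create_regexes_alt r = bridge r := by
            apply ih
            have h1 : r.length ≤ xs.length := by rw [hr]; exact spanFW_snd_length fw xs
            have h2 : xs.length + 1 ≤ n + 1 := by simpa using hl
            omega
          rw [← halt]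
          show _ = (((List.range r.length).filter (bPred (r.map firstWord))).zip
            (((List.range r.length).filter (bPred (r.map firstWord))).drop 1 ++ [r.length])).foldl
            (bStepIdx (r.map firstWord) (r.map follow)) []
          rw [hS₂]
          simp
        rw [hIH]
        -- and the bridge side peels its first group the same way
        have hbridge : bridge (x :: xs) = bStep [] (fw, g) ++ bridge r := by
          rw [bridge, groupsFW_cons, List.foldl_cons, foldl_bStep_append]
          rfl
        rw [hbridge]
  intro idioms
  exact aux idioms.length idioms (Nat.le_refl _)

-- ===== VERDICT (by name: the statement is the Claim_ definition above) =====
theorem create_regexes_spec : Claim_unchanged_create_regexes := by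
  intro idioms _ hpre
  unfold Spec_create_regexes
  intro hd
  cases idioms with
  | nil => exact absurd rfl hd
  | cons x xs => rw [A_eq_bridge x xs hpre, B_eq_bridge]

theorem create_regexes_changed : Claim_changed_create_regexes := by
  unfold Claim_changed_create_regexes
  refine ⟨by decide, by decide, rfl, by decide, ?_, by decide⟩
  simp [create_regexes_alt, pvDiffWitness_create_regexes, pvDiffWitnessOut_create_regexes]

theorem create_regexes_tight : Claim_exact_create_regexes := by
  intro idioms _ _ hd
  subst hd
  have h := create_regexes_changed
  unfold Claim_changed_create_regexes at h
  obtain ⟨-, -, -, hA, hB, hne⟩ := h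
  unfold pvDiffWitness_create_regexes at hA hB
  rw [hA, hB]
  exact hne
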